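-- pv_equiv track=rewrite | github.com/dennishansen/crow-planetary-audit | main.py | parse_dream_response
-- ===== SOURCE A (Python) =====
-- def parse_dream_response(response):
--     """Parse Dreamer actions."""
--     lines = response.strip().split('\n')
--     valid_actions = ['THINK', 'RUN_COMMAND', 'INTERNAL_QUERY', 'WAKE']
--
--     action_indices = []
--     for i, line in enumerate(lines):
--         if line.strip() in valid_actions:
--             action_indices.append((i, line.strip()))
--
--     if not action_indices:
--         return [(None, response)]
--
--     actions = []
--     for idx, (line_idx, action) in enumerate(action_indices):
--         start = line_idx + 1
--         end = action_indices[idx + 1][0] if idx + 1 < len(action_indices) else len(lines)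
--         content = '\n'.join(lines[start:end]).strip()
--         actions.append((action, content))
--
--     return actions
-- ===== SOURCE B (Python) =====
-- def parse_dream_response(response):
--     """Parse Dreamer actions."""
--     valid_actions = ['THINK', 'RUN_COMMAND', 'INTERNAL_QUERY', 'WAKE']
--     current = None
--     buffer = []
--     actions = []
--     for line in response.strip().split('\n'):
--         stripped = line.strip()
--         if stripped in valid_actions:
--             if current is not None:
--                 actions.append((current, '\n'.join(buffer).strip()))
--             current = stripped
--             buffer = []
--         else:
--             buffer.append(line)
--     if current is None:
--         return [(None, response)]
--     actions.append((current, '\n'.join(buffer).strip()))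
--     return actions
-- ===== Notes on version B (the rewrite author's own statement) =====
-- stated objective: simpler
-- what changed: Replaced the two-pass parser (collect all marker line indices, then slice between consecutive indices with a lookahead) by a single pass that keeps a current action and a buffer of content lines, flushing the buffer whenever a new marker line is seen.
import Mathlib
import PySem

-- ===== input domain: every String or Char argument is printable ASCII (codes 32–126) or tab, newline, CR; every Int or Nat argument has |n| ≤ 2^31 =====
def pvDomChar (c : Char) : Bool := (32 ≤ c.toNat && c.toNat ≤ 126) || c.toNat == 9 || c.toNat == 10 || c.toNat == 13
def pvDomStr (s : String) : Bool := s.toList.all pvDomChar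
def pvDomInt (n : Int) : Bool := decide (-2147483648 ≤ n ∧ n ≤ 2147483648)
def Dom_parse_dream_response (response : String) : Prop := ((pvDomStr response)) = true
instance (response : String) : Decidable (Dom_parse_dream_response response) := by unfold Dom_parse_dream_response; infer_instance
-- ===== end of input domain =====

-- B replaces A's two passes (collect marker indices, then slice between consecutive
-- indices with a lookahead) by one pass keeping a current action and a content buffer: simpler.

-- ===== PORT A =====
def parse_dream_response (response : String) : List (Option String × String) :=
  -- the separator "\n" is nonempty, so Python's split never raises: split? is always 'some'
  let lines := (PySem.Str.split? (PySem.Str.strip response) "\n").getD []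
  let valid_actions : List String := ["THINK", "RUN_COMMAND", "INTERNAL_QUERY", "WAKE"]
  let action_indices : List (Int × String) :=
    (PySem.List.enumerate lines).foldl (fun acc p =>
      if PySem.Str.strip p.2 ∈ valid_actions then acc ++ [(p.1, PySem.Str.strip p.2)] else acc) []
  if action_indices = [] then [(none, response)]
  else
    (PySem.List.enumerate action_indices).foldl (fun acc q =>
      let start : Int := q.2.1 + 1
      -- action_indices[idx + 1] is always in range under the guard, so pyGetD's default is never read
      let e : Int := if q.1 + 1 < (action_indices.length : Int) then
          (PySem.List.pyGetD action_indices (q.1 + 1) (0, "")).1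
        else (lines.length : Int)
      let content := PySem.Str.strip (PySem.Str.join "\n" (PySem.List.slice lines (some start) (some e)))
      acc ++ [(some q.2.2, content)]) []

-- ===== PORT B =====
def pdrStep (st : Option String × List String × List (Option String × String)) (line : String) :
    Option String × List String × List (Option String × String) :=
  let stripped := PySem.Str.strip line
  if stripped ∈ (["THINK", "RUN_COMMAND", "INTERNAL_QUERY", "WAKE"] : List String) then
    match st.1 with
    | some a => (some stripped, [], st.2.2 ++ [(some a, PySem.Str.strip (PySem.Str.join "\n" st.2.1))])
    | none => (some stripped, [], st.2.2)
  else
    (st.1, st.2.1 ++ [line], st.2.2)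

def parse_dream_response_alt (response : String) : List (Option String × String) :=
  -- the separator "\n" is nonempty, so Python's split never raises: split? is always 'some'
  let fin := ((PySem.Str.split? (PySem.Str.strip response) "\n").getD []).foldl pdrStep
    ((none, [], []) : Option String × List String × List (Option String × String))
  match fin.1 with
  | none => [(none, response)]
  | some a => fin.2.2 ++ [(some a, PySem.Str.strip (PySem.Str.join "\n" fin.2.1))]

-- ===== PRECONDITION & SPEC =====
def Spec_parse_dream_response (response : String) (out : List (Option String × String)) : Prop := out = parse_dream_response_alt response
instance (response : String) (out : List (Option String × String)) : Decidable (Spec_parse_dream_response response out) := by unfold Spec_parse_dream_response; infer_instance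

-- ===== CLAIM (what is proved, stated in full; the proofs are below) =====
def Claim_equal_parse_dream_response : Prop := ∀ (response : String), Dom_parse_dream_response response → Spec_parse_dream_response response (parse_dream_response response)

-- ===== LEMMAS AND PROOFS =====

-- "this line is a marker line"
def pdrAct (l : String) : Bool := decide (PySem.Str.strip l ∈ (["THINK", "RUN_COMMAND", "INTERNAL_QUERY", "WAKE"] : List String))

-- A's first loop: marker indices of ls, counting from s
def pdrAiL (ls : List String) (s : Int) : List (Int × String) :=
  ((PySem.List.enumerate ls s).filter (fun p => pdrAct p.2)).map (fun p => (p.1, PySem.Str.strip p.2))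

-- A's second loop as a recursion over the index list
def pdrResA (lines : List String) : List (Int × String) → List (Option String × String)
  | [] => []
  | (i, a) :: rest =>
    let e : Int := match rest with | [] => (lines.length : Int) | (j, _) :: _ => j
    (some a, PySem.Str.strip (PySem.Str.join "\n" (PySem.List.slice lines (some (i + 1)) (some e)))) :: pdrResA lines rest

-- the common segment decomposition
def pdrSegs : List String → List (Option String × String)
  | [] => []
  | l :: ls =>
    if pdrAct l then
      (some (PySem.Str.strip l),
        PySem.Str.strip (PySem.Str.join "\n" (ls.takeWhile (fun x => !pdrAct x))))
        :: pdrSegs (ls.dropWhile (fun x => !pdrAct x))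
    else pdrSegs ls
termination_by ls => ls.length
decreasing_by
  · exact Nat.lt_succ_of_le (List.length_dropWhile_le _ _)
  · exact Nat.lt_succ_self _

theorem pdrAiL_nil (s : Int) : pdrAiL [] s = [] := rfl

theorem pdrAiL_cons (l : String) (ls : List String) (s : Int) :
    pdrAiL (l :: ls) s =
      if pdrAct l then (s, PySem.Str.strip l) :: pdrAiL ls (s + 1) else pdrAiL ls (s + 1) := by
  simp only [pdrAiL, PySem.List.enumerate_cons, List.filter_cons]
  by_cases h : pdrAct l <;> simp [h]

theorem pdrAiL_eq_nil_iff (ls : List String) (s : Int) :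
    pdrAiL ls s = [] ↔ ls.all (fun x => !pdrAct x) := by
  induction ls generalizing s with
  | nil => simp [pdrAiL_nil]
  | cons l ls ih =>
    rw [pdrAiL_cons]
    by_cases h : pdrAct l <;> simp [h, ih]

theorem pdrAiL_append_notAct (pre suf : List String) (s : Int)
    (h : ∀ x ∈ pre, pdrAct x = false) :
    pdrAiL (pre ++ suf) s = pdrAiL suf (s + pre.length) := by
  induction pre generalizing s with
  | nil => simp
  | cons p pre ih =>
    rw [List.cons_append, pdrAiL_cons]
    have hp : pdrAct p = false := h p (by simp)
    rw [if_neg (by simp [hp]), ih _ (fun x hx => h x (by simp [hx]))]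
    congr 1
    simp only [List.length_cons]
    push_cast
    ring

-- A's second foldl over 'enumerate action_indices' equals pdrResA
theorem pdrSecondLoop (lines : List String) (ai : List (Int × String)) :
    ∀ (k : Nat) (acc : List (Option String × String)),
      (PySem.List.enumerate (ai.drop k) k).foldl (fun acc q =>
        let start : Int := q.2.1 + 1
        let e : Int := if q.1 + 1 < (ai.length : Int) then
            (PySem.List.pyGetD ai (q.1 + 1) (0, "")).1
          else (lines.length : Int)
        let content := PySem.Str.strip (PySem.Str.join "\n" (PySem.List.slice lines (some start) (some e)))
        acc ++ [(some q.2.2, content)]) acc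
      = acc ++ pdrResA lines (ai.drop k) := by
  intro k acc
  induction hn : ai.length - k generalizing k acc with
  | zero =>
    have h : ai.drop k = [] := List.drop_eq_nil_of_le (by omega)
    simp [h, pdrResA]
  | succ n ih =>
    have hk : k < ai.length := by omega
    have hd : ai.drop k = ai[k] :: ai.drop (k + 1) := (List.getElem_cons_drop hk).symm
    rw [hd, PySem.List.enumerate_cons, List.foldl_cons,
      show (k : Int) + 1 = ((k + 1 : Nat) : Int) by push_cast; ring,
      ih (k + 1) _ (by omega)]
    by_cases hlt : k + 1 < ai.length
    · have hd2 : ai.drop (k + 1) = ai[k + 1] :: ai.drop (k + 2) := (List.getElem_cons_drop hlt).symm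
      simp only [pdrResA, hd2]
      rw [if_pos (by exact_mod_cast hlt), PySem.List.pyGetD_natCast]
      simp [List.getD, List.getElem?_eq_getElem hlt]
    · have hd2 : ai.drop (k + 1) = [] := List.drop_eq_nil_of_le (by omega)
      simp only [pdrResA, hd2]
      rw [if_neg (by exact_mod_cast hlt)]
      simp

-- one-step unfoldings of pdrResA (definitional)
theorem pdrResA_single (lines : List String) (i : Int) (a : String) :
    pdrResA lines [(i, a)]
      = [(some a, PySem.Str.strip (PySem.Str.join "\n"
          (PySem.List.slice lines (some (i + 1)) (some (lines.length : Int)))))] := rfl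

theorem pdrResA_cons_cons (lines : List String) (i : Int) (a : String) (j : Int) (b : String)
    (r : List (Int × String)) :
    pdrResA lines ((i, a) :: (j, b) :: r)
      = (some a, PySem.Str.strip (PySem.Str.join "\n"
          (PySem.List.slice lines (some (i + 1)) (some j)))) :: pdrResA lines ((j, b) :: r) := rfl

-- A's result on the suffix ls = lines.drop s equals the segment decomposition
theorem pdrA_eq_segs (lines : List String) :
    ∀ (ls : List String) (s : Nat), lines.drop s = ls →
      pdrResA lines (pdrAiL ls (s : Int)) = pdrSegs ls := by
  intro ls
  induction ls using pdrSegs.induct with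
  | case1 => intro s _; simp [pdrAiL_nil, pdrResA, pdrSegs]
  | case2 l ls hAct ih =>
    intro s hs
    have hls : lines.drop (s + 1) = ls := by
      have h := congrArg (List.drop 1) hs
      rw [List.drop_drop] at h
      simpa using h
    have hsplit : ls.takeWhile (fun x => !pdrAct x) ++ ls.dropWhile (fun x => !pdrAct x) = ls :=
      List.takeWhile_append_dropWhile
    have hdw : ls.drop (ls.takeWhile (fun x => !pdrAct x)).length = ls.dropWhile (fun x => !pdrAct x) := by
      set n := (ls.takeWhile (fun x => !pdrAct x)).length with hn
      conv_lhs => rw [← List.takeWhile_append_dropWhile (p := fun x => !pdrAct x) (l := ls)]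
      rw [hn, List.drop_left]
    have hDp : lines.drop (s + 1 + (ls.takeWhile (fun x => !pdrAct x)).length)
        = ls.dropWhile (fun x => !pdrAct x) := by
      have h := congrArg (List.drop (ls.takeWhile (fun x => !pdrAct x)).length) hls
      rw [List.drop_drop] at h
      rw [h, hdw]
    have haiL : pdrAiL ls ((s : Int) + 1)
        = pdrAiL (ls.dropWhile (fun x => !pdrAct x))
            ((s + 1 + (ls.takeWhile (fun x => !pdrAct x)).length : Nat) : Int) := by
      conv_lhs => rw [← hsplit]
      rw [pdrAiL_append_notAct _ _ _ (fun x hx => by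
        have := List.mem_takeWhile_imp hx
        simpa using this)]
      congr 1
    have hlen : ls.length = lines.length - (s + 1) := by rw [← hls, List.length_drop]
    have hsle : s < lines.length := by
      have hne : lines.drop s ≠ [] := by rw [hs]; simp
      by_contra hcon
      exact hne (List.drop_eq_nil_of_le (by omega))
    rw [pdrAiL_cons, if_pos hAct]
    cases hDpc : ls.dropWhile (fun x => !pdrAct x) with
    | nil =>
      have hTls : ls.takeWhile (fun x => !pdrAct x) = ls := by
        rw [hDpc] at hsplit
        simpa using hsplit
      rw [haiL, hDpc, pdrAiL_nil, pdrResA_single,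
        show (s : Int) + 1 = ((s + 1 : Nat) : Int) by push_cast; ring,
        PySem.List.slice_natCast, hls, List.take_of_length_le (by omega)]
      conv_rhs => rw [pdrSegs]
      rw [if_pos hAct, hDpc, hTls]
      simp [pdrSegs]
    | cons d ds =>
      have hdAct : pdrAct d = true := by
        have h := List.head_dropWhile_not (fun x => !pdrAct x) (l := ls) (by simp [hDpc])
        simp [hDpc] at h
        exact h
      have hrest := ih (s + 1 + (ls.takeWhile (fun x => !pdrAct x)).length) hDp
      rw [hDpc] at hrest
      conv_rhs => rw [pdrSegs]
      rw [if_pos hAct, hDpc, ← hrest, haiL, hDpc, pdrAiL_cons, if_pos hdAct,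
        pdrResA_cons_cons,
        show (s : Int) + 1 = ((s + 1 : Nat) : Int) by push_cast; ring,
        PySem.List.slice_natCast, hls,
        show (s + 1 + (ls.takeWhile (fun x => !pdrAct x)).length) - (s + 1)
          = (ls.takeWhile (fun x => !pdrAct x)).length by omega,
        (List.prefix_iff_eq_take.mp (List.takeWhile_prefix _)).symm]
  | case3 l ls hAct ih =>
    intro s hs
    have hls : lines.drop (s + 1) = ls := by
      have h := congrArg (List.drop 1) hs
      rw [List.drop_drop] at h
      simpa using h
    rw [pdrAiL_cons, if_neg hAct,
      show (s : Int) + 1 = ((s + 1 : Nat) : Int) by push_cast; ring,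
      ih (s + 1) hls]
    conv_rhs => rw [pdrSegs]
    rw [if_neg hAct]

-- the final match of parse_dream_response_alt, as a function of the fold state
def pdrFin (response : String) (st : Option String × List String × List (Option String × String)) :
    List (Option String × String) :=
  match st.1 with
  | none => [(none, response)]
  | some a => st.2.2 ++ [(some a, PySem.Str.strip (PySem.Str.join "\n" st.2.1))]

-- B's fold from an active-action state
theorem pdrB_active (response : String) :
    ∀ (ls : List String) (a : String) (buf : List String) (out : List (Option String × String)),
      pdrFin response (ls.foldl pdrStep (some a, buf, out))
      = out ++ (some a, PySem.Str.strip (PySem.Str.join "\n" (buf ++ ls.takeWhile (fun x => !pdrAct x))))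
          :: pdrSegs (ls.dropWhile (fun x => !pdrAct x)) := by
  intro ls
  induction ls with
  | nil => intro a buf out; simp [pdrFin, pdrSegs]
  | cons l ls ih =>
    intro a buf out
    by_cases hl : PySem.Str.strip l ∈ (["THINK", "RUN_COMMAND", "INTERNAL_QUERY", "WAKE"] : List String)
    · have hb : pdrAct l = true := by simp [pdrAct, hl]
      rw [List.foldl_cons, show pdrStep (some a, buf, out) l
          = (some (PySem.Str.strip l), [],
              out ++ [(some a, PySem.Str.strip (PySem.Str.join "\n" buf))]) by simp [pdrStep, hl],
        ih]
      simp [hb, pdrSegs]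
    · have hb : pdrAct l = false := by simp [pdrAct, hl]
      rw [List.foldl_cons, show pdrStep (some a, buf, out) l
          = (some a, buf ++ [l], out) by simp [pdrStep, hl],
        ih]
      simp [hb]

-- B's fold from the initial no-action state
theorem pdrB_none (response : String) :
    ∀ (ls : List String) (buf : List String),
      pdrFin response (ls.foldl pdrStep (none, buf, []))
      = if ls.all (fun x => !pdrAct x) then [(none, response)] else pdrSegs ls := by
  intro ls
  induction ls with
  | nil => intro buf; simp [pdrFin]
  | cons l ls ih =>
    intro buf
    by_cases hl : PySem.Str.strip l ∈ (["THINK", "RUN_COMMAND", "INTERNAL_QUERY", "WAKE"] : List String)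
    · have hb : pdrAct l = true := by simp [pdrAct, hl]
      rw [List.foldl_cons, show pdrStep (none, buf, []) l
          = (some (PySem.Str.strip l), [], []) by simp [pdrStep, hl],
        pdrB_active]
      conv_rhs => rw [pdrSegs]
      simp [hb]
    · have hb : pdrAct l = false := by simp [pdrAct, hl]
      rw [List.foldl_cons, show pdrStep (none, buf, []) l
          = (none, buf ++ [l], []) by simp [pdrStep, hl],
        ih]
      simp [hb, pdrSegs]

-- A's first loop is pdrAiL
theorem pdrFirstLoop (ls : List String) (s : Int) :
    (PySem.List.enumerate ls s).foldl (fun acc p =>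
      if PySem.Str.strip p.2 ∈ (["THINK", "RUN_COMMAND", "INTERNAL_QUERY", "WAKE"] : List String)
      then acc ++ [(p.1, PySem.Str.strip p.2)] else acc) [] = pdrAiL ls s := by
  rw [show (fun acc (p : Int × String) =>
      if PySem.Str.strip p.2 ∈ (["THINK", "RUN_COMMAND", "INTERNAL_QUERY", "WAKE"] : List String)
      then acc ++ [(p.1, PySem.Str.strip p.2)] else acc)
      = (fun acc (p : Int × String) =>
        if pdrAct p.2 then acc ++ [(p.1, PySem.Str.strip p.2)] else acc) by
    funext acc p
    simp [pdrAct]]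
  rw [PySem.List.foldl_append_if]
  simp [pdrAiL]

-- ===== VERDICT (by name: the statement is the Claim_ definition above) =====
set_option maxHeartbeats 2000000 in
theorem parse_dream_response_spec : Claim_equal_parse_dream_response := by
  intro r _
  unfold Spec_parse_dream_response parse_dream_response parse_dream_response_alt
  simp only [pdrFirstLoop]
  trans (if ((PySem.Str.split? (PySem.Str.strip r) "\n").getD []).all (fun x => !pdrAct x)
    then [(none, r)] else pdrSegs ((PySem.Str.split? (PySem.Str.strip r) "\n").getD []))
  · set lines := (PySem.Str.split? (PySem.Str.strip r) "\n").getD [] with hlines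
    by_cases hA : pdrAiL lines 0 = []
    · rw [if_pos hA, if_pos ((pdrAiL_eq_nil_iff lines 0).mp hA)]
    · rw [if_neg hA, if_neg (by
        intro hall
        exact hA ((pdrAiL_eq_nil_iff lines 0).mpr hall))]
      have h2 := pdrSecondLoop lines (pdrAiL lines 0) 0 []
      rw [List.drop_zero] at h2
      rw [show ((0 : Nat) : Int) = (0 : Int) by simp] at h2
      rw [h2, List.nil_append]
      have h3 := pdrA_eq_segs lines lines 0 (by simp)
      rw [show ((0 : Nat) : Int) = (0 : Int) by simp] at h3
      rw [h3]
  · exact (pdrB_none r ((PySem.Str.split? (PySem.Str.strip r) "\n").getD []) []).symm
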